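-- pv_equiv track=rewrite | github.com/DigiJoe79/AudioBook-Maker | backend/services/epub_importer.py | _normalize_markdown
-- ===== SOURCE A (Python) =====
-- from typing import List
--
-- def _normalize_markdown(text: str) -> str:
--     """
--     Basic cleanup for markdown output:
--     - Strip leading/trailing whitespace
--     - Collapse runs of blank lines
--     """
--     lines = [line.rstrip() for line in text.splitlines()]
--
--     cleaned: List[str] = []
--     blank_run = 0
--     for line in lines:
--         if line.strip() == "":
--             blank_run += 1
--             # Allow at most one consecutive blank line
--             if blank_run > 1:
--                 continue
--         else:
--             blank_run = 0
--         cleaned.append(line)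
--
--     result = "\n".join(cleaned).strip()
--     return result
-- ===== SOURCE B (Python) =====
-- def _normalize_markdown(text: str) -> str:
--     lines = [line.rstrip() for line in text.splitlines()]
--     paragraphs = []
--     current = []
--     for line in lines:
--         if line:
--             current.append(line)
--         elif current:
--             paragraphs.append("\n".join(current))
--             current = []
--     if current:
--         paragraphs.append("\n".join(current))
--     return "\n\n".join(paragraphs).strip()
-- ===== Notes on version B (the rewrite author's own statement) =====
-- stated objective: idiomatic
-- what changed: Replaces the stateful per-line blank-run counter (keeping at most one blank line, then a final strip) by grouping nonblank lines into paragraphs and joining the paragraphs with a double newline, stripping at the end.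
import Mathlib
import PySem

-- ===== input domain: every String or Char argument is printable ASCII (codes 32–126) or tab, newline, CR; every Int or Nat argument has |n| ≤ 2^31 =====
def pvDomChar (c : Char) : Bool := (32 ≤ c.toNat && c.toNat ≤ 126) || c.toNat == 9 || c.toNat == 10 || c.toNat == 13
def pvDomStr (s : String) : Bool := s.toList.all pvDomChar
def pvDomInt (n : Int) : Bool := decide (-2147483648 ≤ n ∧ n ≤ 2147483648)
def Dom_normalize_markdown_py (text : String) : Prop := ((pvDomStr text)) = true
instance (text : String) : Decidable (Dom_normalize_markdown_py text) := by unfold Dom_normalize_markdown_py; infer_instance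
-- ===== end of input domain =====

-- B replaces A's stateful blank-run counter with paragraph grouping joined by "\n\n" (idiomatic, same cost).

-- ===== PORT A =====
def normalize_markdown_py (text : String) : String :=
  let lines := (PySem.Str.splitlines text).map PySem.Str.rstrip
  let st := lines.foldl (fun (st : List String × Nat) line =>
      if PySem.Str.strip line == "" then
        if st.2 + 1 > 1 then (st.1, st.2 + 1) else (st.1 ++ [line], st.2 + 1)
      else (st.1 ++ [line], 0)) ([], 0)
  PySem.Str.strip (PySem.Str.join "\n" st.1)

-- ===== PORT B =====
def normalize_markdown_py_alt (text : String) : String :=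
  let lines := (PySem.Str.splitlines text).map PySem.Str.rstrip
  let st := lines.foldl (fun (st : List String × List String) line =>
      if line ≠ "" then (st.1, st.2 ++ [line])
      else if st.2 ≠ [] then (st.1 ++ [PySem.Str.join "\n" st.2], ([] : List String))
      else st) (([] : List String), ([] : List String))
  let paragraphs := if st.2 ≠ [] then st.1 ++ [PySem.Str.join "\n" st.2] else st.1
  PySem.Str.strip (PySem.Str.join "\n\n" paragraphs)

-- ===== PRECONDITION & SPEC =====
def Spec_normalize_markdown_py (text : String) (out : String) : Prop := out = normalize_markdown_py_alt text
instance (text : String) (out : String) : Decidable (Spec_normalize_markdown_py text out) := by unfold Spec_normalize_markdown_py; infer_instance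

-- ===== CLAIM (what is proved, stated in full; the proofs are below) =====
def Claim_equal_normalize_markdown_py : Prop := ∀ (text : String), Dom_normalize_markdown_py text → Spec_normalize_markdown_py text (normalize_markdown_py text)

-- ===== LEMMAS AND PROOFS =====

-- recursion characterizing A's cleaned list (Bool = "previous line was blank")
def pvRecA : Bool → List String → List String
  | _, [] => []
  | pb, l :: ls => if l == "" then (if pb then pvRecA true ls else l :: pvRecA true ls) else l :: pvRecA false ls

-- recursion characterizing B's paragraph list (first arg = current paragraph)
def pvRecB : List String → List String → List String
  | cur, [] => if cur ≠ [] then [PySem.Str.join "\n" cur] else []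
  | cur, l :: ls =>
      if l ≠ "" then pvRecB (cur ++ [l]) ls
      else if cur ≠ [] then PySem.Str.join "\n" cur :: pvRecB [] ls
      else pvRecB [] ls

theorem pvRecA_nil (pb : Bool) : pvRecA pb [] = [] := rfl
theorem pvRecA_blank (pb : Bool) (ls : List String) :
    pvRecA pb ("" :: ls) = if pb then pvRecA true ls else "" :: pvRecA true ls := by
  simp [pvRecA]
theorem pvRecA_nonblank (pb : Bool) {l : String} (h : l ≠ "") (ls : List String) :
    pvRecA pb (l :: ls) = l :: pvRecA false ls := by
  simp [pvRecA, h]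
theorem pvRecB_nil (cur : List String) :
    pvRecB cur [] = if cur ≠ [] then [PySem.Str.join "\n" cur] else [] := rfl
theorem pvRecB_blank (cur : List String) (ls : List String) :
    pvRecB cur ("" :: ls) =
      if cur ≠ [] then PySem.Str.join "\n" cur :: pvRecB [] ls else pvRecB [] ls := by
  simp [pvRecB]
theorem pvRecB_nonblank {l : String} (h : l ≠ "") (cur ls : List String) :
    pvRecB cur (l :: ls) = pvRecB (cur ++ [l]) ls := by
  simp [pvRecB, h]

def pvStepA (st : List String × Nat) (line : String) : List String × Nat :=
  if PySem.Str.strip line == "" then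
    if st.2 + 1 > 1 then (st.1, st.2 + 1) else (st.1 ++ [line], st.2 + 1)
  else (st.1 ++ [line], 0)

def pvStepB (st : List String × List String) (line : String) : List String × List String :=
  if line ≠ "" then (st.1, st.2 ++ [line])
  else if st.2 ≠ [] then (st.1 ++ [PySem.Str.join "\n" st.2], ([] : List String))
  else st

theorem pvStepA_blank (c : List String) (r : Nat) :
    pvStepA (c, r) "" = if 0 < r then (c, r + 1) else (c ++ [""], r + 1) := by
  show (if PySem.Str.strip "" == "" then
      if r + 1 > 1 then (c, r + 1) else (c ++ [""], r + 1)
    else (c ++ [""], 0)) = _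
  rw [show (PySem.Str.strip "" == "") = true from by decide, if_pos rfl]
  by_cases hr : 0 < r
  · rw [if_pos (by omega : r + 1 > 1), if_pos hr]
  · rw [if_neg (by omega : ¬ r + 1 > 1), if_neg hr]

theorem pvStepA_nonblank (c : List String) (r : Nat) {l : String}
    (h1 : (PySem.Str.strip l == "") = false) : pvStepA (c, r) l = (c ++ [l], 0) := by
  show (if PySem.Str.strip l == "" then
      if r + 1 > 1 then (c, r + 1) else (c ++ [l], r + 1)
    else (c ++ [l], 0)) = _
  rw [h1, if_neg (by simp : ¬ false = true)]

theorem pvStepB_nonblank (ps cur : List String) {l : String} (h : l ≠ "") :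
    pvStepB (ps, cur) l = (ps, cur ++ [l]) := by
  show (if l ≠ "" then (ps, cur ++ [l])
    else if cur ≠ [] then (ps ++ [PySem.Str.join "\n" cur], ([] : List String))
    else (ps, cur)) = _
  rw [if_pos h]

theorem pvStepB_blank_flush (ps : List String) {cur : List String} (hc : cur ≠ []) :
    pvStepB (ps, cur) "" = (ps ++ [PySem.Str.join "\n" cur], []) := by
  show (if ("" : String) ≠ "" then (ps, cur ++ [""])
    else if cur ≠ [] then (ps ++ [PySem.Str.join "\n" cur], ([] : List String))
    else (ps, cur)) = _
  rw [if_neg (by simp), if_pos hc]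

theorem pvStepB_blank_skip (ps : List String) :
    pvStepB (ps, []) "" = (ps, []) := by
  show (if ("" : String) ≠ "" then (ps, [""])
    else if ([] : List String) ≠ [] then (ps ++ [PySem.Str.join "\n" []], ([] : List String))
    else (ps, ([] : List String))) = _
  rw [if_neg (by simp), if_neg (by simp)]

theorem pvFoldA (ls : List String) (h : ∀ l ∈ ls, (PySem.Str.strip l == "") = (l == "")) :
    ∀ (c : List String) (r : Nat),
      (ls.foldl pvStepA (c, r)).1 = c ++ pvRecA (decide (0 < r)) ls := by
  induction ls with
  | nil => intro c r; simp [pvRecA]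
  | cons l t ih =>
    intro c r
    have hl := h l (by simp)
    have ht : ∀ x ∈ t, (PySem.Str.strip x == "") = (x == "") := fun x hx => h x (by simp [hx])
    rw [List.foldl_cons]
    by_cases he : l = ""
    · subst he
      rw [pvStepA_blank]
      by_cases hr : 0 < r
      · rw [if_pos hr, ih ht c (r + 1), pvRecA_blank]
        have b1 : (decide (0 < r)) = true := by simp [hr]
        have b2 : (decide (0 < r + 1)) = true := by simp
        rw [b1, b2, if_pos rfl]
      · rw [if_neg hr, ih ht (c ++ [""]) (r + 1), pvRecA_blank]
        have b1 : (decide (0 < r)) = false := by simpa using hr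
        have b2 : (decide (0 < r + 1)) = true := by simp
        rw [b1, b2, if_neg (by simp)]
        simp
    · have hne : (l == "") = false := by simp [he]
      rw [pvStepA_nonblank c r (by rw [hl]; exact hne), ih ht (c ++ [l]) 0,
        pvRecA_nonblank _ he]
      simp

theorem pvFoldB (ls : List String) : ∀ (ps cur : List String),
    (if (ls.foldl pvStepB (ps, cur)).2 ≠ []
     then (ls.foldl pvStepB (ps, cur)).1 ++ [PySem.Str.join "\n" (ls.foldl pvStepB (ps, cur)).2]
     else (ls.foldl pvStepB (ps, cur)).1) = ps ++ pvRecB cur ls := by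
  induction ls with
  | nil =>
    intro ps cur
    by_cases hc : cur = [] <;> simp [pvRecB_nil, hc]
  | cons l t ih =>
    intro ps cur
    rw [List.foldl_cons]
    by_cases hl : l = ""
    · subst hl
      by_cases hc : cur = []
      · subst hc
        rw [pvStepB_blank_skip, ih ps [], pvRecB_blank]
        simp
      · rw [pvStepB_blank_flush ps hc, ih (ps ++ [PySem.Str.join "\n" cur]) [],
          pvRecB_blank, if_pos hc]
        simp
    · rw [pvStepB_nonblank ps cur hl, ih ps (cur ++ [l]), pvRecB_nonblank hl]

theorem pvRecB_ne_nil (ls : List String) : ∀ cur, cur ≠ [] → pvRecB cur ls ≠ [] := by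
  induction ls with
  | nil => intro cur hc; simp [pvRecB_nil, hc]
  | cons l t ih =>
    intro cur hc
    by_cases hl : l = ""
    · subst hl; rw [pvRecB_blank, if_pos hc]; simp
    · rw [pvRecB_nonblank hl]; exact ih (cur ++ [l]) (by simp)

theorem pvJoinAppend (sep : List Char) (xs ys : List (List Char)) (hx : xs ≠ []) (hy : ys ≠ []) :
    PySem.Chars.join sep (xs ++ ys) = PySem.Chars.join sep xs ++ sep ++ PySem.Chars.join sep ys := by
  induction xs with
  | nil => cases hx rfl
  | cons a xs ih =>
    cases xs with
    | nil =>
      cases ys with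
      | nil => cases hy rfl
      | cons b ys => simp [PySem.Chars.join_singleton, PySem.Chars.join_cons_cons]
    | cons a' xs' =>
      have h2 := ih (by simp)
      simp only [List.cons_append, PySem.Chars.join_cons_cons] at *
      rw [h2]
      simp

-- abbreviations used by the core lemmas
def pvJ1 (xs : List String) : List Char := PySem.Chars.join ['\n'] (xs.map String.toList)
def pvJ2 (xs : List String) : List Char := PySem.Chars.join ['\n', '\n'] (xs.map String.toList)

theorem pvJ1_toList (cur : List String) : (PySem.Str.join "\n" cur).toList = pvJ1 cur := by
  rw [PySem.Str.toList_join]; rfl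

theorem pvJ1_cons (l : String) (xs : List String) (hx : xs ≠ []) :
    pvJ1 (l :: xs) = l.toList ++ ['\n'] ++ pvJ1 xs := by
  cases xs with
  | nil => cases hx rfl
  | cons y ys => simp [pvJ1, PySem.Chars.join_cons_cons]

theorem pvJ2_cons (l : String) (xs : List String) (hx : xs ≠ []) :
    pvJ2 (l :: xs) = l.toList ++ ['\n', '\n'] ++ pvJ2 xs := by
  cases xs with
  | nil => cases hx rfl
  | cons y ys => simp [pvJ2, PySem.Chars.join_cons_cons]

theorem pvJ1_append (xs ys : List String) (hx : xs ≠ []) (hy : ys ≠ []) :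
    pvJ1 (xs ++ ys) = pvJ1 xs ++ ['\n'] ++ pvJ1 ys := by
  rw [pvJ1, List.map_append, pvJoinAppend _ _ _ (by simpa using hx) (by simpa using hy)]
  rfl

-- heart of the proof: inside (b = false) or right after (b = true) a paragraph, A's joined
-- cleaned list equals B's joined paragraphs up to at most one trailing newline
theorem pvM (ls : List String) : ∀ (cur : List String) (b : Bool), cur ≠ [] →
    ∃ k ≤ 1, pvJ1 (cur ++ (if b then [""] else []) ++ pvRecA b ls)
      = pvJ2 (if b then PySem.Str.join "\n" cur :: pvRecB [] ls else pvRecB cur ls)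
        ++ List.replicate k '\n' := by
  induction ls with
  | nil =>
    intro cur b hc
    cases b
    · refine ⟨0, by omega, ?_⟩
      simp [pvRecA_nil, pvRecB_nil, hc, pvJ1, pvJ2, PySem.Chars.join_singleton]
    · refine ⟨1, le_refl 1, ?_⟩
      have hr : pvRecB ([] : List String) [] = [] := by simp [pvRecB_nil]
      have hB : pvJ2 (PySem.Str.join "\n" cur :: pvRecB [] []) = pvJ1 cur := by
        rw [hr]; simp [pvJ1, pvJ2, PySem.Chars.join_singleton]
      simp only [if_true, pvRecA_nil, List.append_nil, hB]
      rw [pvJ1_append cur [""] hc (by simp)]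
      simp [pvJ1, PySem.Chars.join_singleton, List.replicate]
  | cons l t ih =>
    intro cur b hc
    by_cases hl : l = ""
    · subst hl
      obtain ⟨k, hk, he⟩ := ih cur true hc
      cases b
      · exact ⟨k, hk, by simpa [pvRecA_blank, pvRecB_blank, hc] using he⟩
      · exact ⟨k, hk, by simpa [pvRecA_blank, pvRecB_blank] using he⟩
    · cases b
      · obtain ⟨k, hk, he⟩ := ih (cur ++ [l]) false (by simp)
        exact ⟨k, hk, by simpa [pvRecA_nonblank _ hl, pvRecB_nonblank hl] using he⟩
      · -- b = true, a nonblank l starts a new paragraph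
        obtain ⟨k, hk, he⟩ := ih [l] false (by simp)
        refine ⟨k, hk, ?_⟩
        have he' : pvJ1 ([l] ++ pvRecA false t) = pvJ2 (pvRecB [l] t) ++ List.replicate k '\n' := by
          simpa using he
        have hrecB : pvRecB ([] : List String) (l :: t) = pvRecB [l] t := by
          simpa using pvRecB_nonblank hl [] t
        simp only [if_true, pvRecA_nonblank _ hl, hrecB]
        have hA : pvJ1 (cur ++ [""] ++ l :: pvRecA false t)
            = pvJ1 cur ++ ['\n', '\n'] ++ pvJ1 ([l] ++ pvRecA false t) := by
          rw [List.append_assoc, pvJ1_append cur ([""] ++ l :: pvRecA false t) hc (by simp)]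
          rw [pvJ1_append [""] (l :: pvRecA false t) (by simp) (by simp)]
          simp [pvJ1, PySem.Chars.join_singleton]
        have hB : pvJ2 (PySem.Str.join "\n" cur :: pvRecB [l] t)
            = pvJ1 cur ++ ['\n', '\n'] ++ pvJ2 (pvRecB [l] t) := by
          rw [pvJ2_cons _ _ (pvRecB_ne_nil t [l] (by simp)), pvJ1_toList]
        rw [hA, hB, he']
        simp

-- leading blanks with nothing accumulated yet
theorem pvL (ls : List String) : ∃ j ≤ 1, ∃ k ≤ 1,
    pvJ1 ("" :: pvRecA true ls)
      = List.replicate j '\n' ++ pvJ2 (pvRecB [] ls) ++ List.replicate k '\n' := by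
  induction ls with
  | nil =>
    refine ⟨0, by omega, 0, by omega, ?_⟩
    simp [pvRecA_nil, pvRecB_nil, pvJ1, pvJ2, PySem.Chars.join_singleton]
  | cons l t ih =>
    by_cases hl : l = ""
    · subst hl
      obtain ⟨j, hj, k, hk, he⟩ := ih
      exact ⟨j, hj, k, hk, by simpa [pvRecA_blank, pvRecB_blank] using he⟩
    · obtain ⟨k, hk, he⟩ := pvM t [l] false (by simp)
      refine ⟨1, le_refl 1, k, hk, ?_⟩
      have he' : pvJ1 ([l] ++ pvRecA false t) = pvJ2 (pvRecB [l] t) ++ List.replicate k '\n' := by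
        simpa using he
      have hrecB : pvRecB ([] : List String) (l :: t) = pvRecB [l] t := by
        simpa using pvRecB_nonblank hl [] t
      rw [pvRecA_nonblank _ hl, hrecB]
      rw [pvJ1_cons "" (l :: pvRecA false t) (by simp)]
      rw [show (l :: pvRecA false t) = [l] ++ pvRecA false t from rfl, he']
      simp [List.replicate]

theorem pvT (ls : List String) : ∃ j ≤ 1, ∃ k ≤ 1,
    pvJ1 (pvRecA false ls)
      = List.replicate j '\n' ++ pvJ2 (pvRecB [] ls) ++ List.replicate k '\n' := by
  cases ls with
  | nil =>
    exact ⟨0, by omega, 0, by omega, by simp [pvRecA_nil, pvRecB_nil, pvJ1, pvJ2]⟩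
  | cons l t =>
    by_cases hl : l = ""
    · subst hl
      obtain ⟨j, hj, k, hk, he⟩ := pvL t
      exact ⟨j, hj, k, hk, by simpa [pvRecA_blank, pvRecB_blank] using he⟩
    · obtain ⟨k, hk, he⟩ := pvM t [l] false (by simp)
      refine ⟨0, by omega, k, hk, ?_⟩
      have he' : pvJ1 ([l] ++ pvRecA false t) = pvJ2 (pvRecB [l] t) ++ List.replicate k '\n' := by
        simpa using he
      have hrecB : pvRecB ([] : List String) (l :: t) = pvRecB [l] t := by
        simpa using pvRecB_nonblank hl [] t
      rw [pvRecA_nonblank _ hl, hrecB]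
      rw [show (l :: pvRecA false t) = [l] ++ pvRecA false t from rfl, he']
      simp

theorem pvDropWhileRepl (n : Nat) :
    List.dropWhile PySem.Chars.isspace (List.replicate n '\n') = [] := by
  rw [List.dropWhile_eq_nil_iff]
  intro x hx
  rw [List.eq_of_mem_replicate hx]
  decide

theorem pvStripPad (s : List Char) (j k : Nat) :
    PySem.Chars.strip (List.replicate j '\n' ++ s ++ List.replicate k '\n')
      = PySem.Chars.strip s := by
  have h1 : PySem.Chars.lstrip (List.replicate j '\n' ++ s ++ List.replicate k '\n')
      = PySem.Chars.lstrip (s ++ List.replicate k '\n') := by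
    rw [PySem.Chars.lstrip, PySem.Chars.lstrip, List.append_assoc, List.dropWhile_append,
      pvDropWhileRepl]
    simp
  rw [PySem.Chars.strip, h1, PySem.Chars.lstrip, List.dropWhile_append]
  by_cases he : (List.dropWhile PySem.Chars.isspace s).isEmpty = true
  · rw [if_pos he, pvDropWhileRepl]
    rw [PySem.Chars.strip, PySem.Chars.lstrip]
    rw [List.isEmpty_iff] at he
    rw [he]
  · rw [if_neg he]
    rw [PySem.Chars.strip, PySem.Chars.lstrip]
    rw [PySem.Chars.rstrip, PySem.Chars.rstrip, List.reverse_append, List.reverse_replicate,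
      List.dropWhile_append, pvDropWhileRepl]
    simp

theorem pvStripEmptyIff (x : String) :
    (PySem.Str.strip (PySem.Str.rstrip x) == "") = (PySem.Str.rstrip x == "") := by
  have key : ∀ (cs : List Char), PySem.Chars.strip (PySem.Chars.rstrip cs) = [] →
      PySem.Chars.rstrip cs = [] := by
    intro cs h
    by_contra hne
    have hr : List.dropWhile PySem.Chars.isspace cs.reverse ≠ [] := by
      intro hcon
      exact hne (by rw [PySem.Chars.rstrip, hcon]; rfl)
    -- from h: every char of (rstrip cs) is whitespace
    have hall : ∀ c ∈ PySem.Chars.rstrip cs, PySem.Chars.isspace c = true := by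
      intro c hcmem
      by_cases hsp : PySem.Chars.isspace c = true
      · exact hsp
      · exfalso
        rw [PySem.Chars.strip, PySem.Chars.rstrip, PySem.Chars.lstrip,
          List.reverse_eq_nil_iff] at h
        have h2 := List.dropWhile_eq_nil_iff.mp h
        have hmem' : c ∈ List.dropWhile PySem.Chars.isspace (PySem.Chars.rstrip cs) := by
          have hsplit := List.takeWhile_append_dropWhile
            (p := PySem.Chars.isspace) (l := PySem.Chars.rstrip cs)
          rw [← hsplit] at hcmem
          rcases List.mem_append.mp hcmem with hmem | hmem
          · exact absurd (List.mem_takeWhile_imp hmem) hsp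
          · exact hmem
        exact hsp (h2 c (List.mem_reverse.mpr hmem'))
    have hhead := List.head_dropWhile_not PySem.Chars.isspace hr
    have hmem : (List.dropWhile PySem.Chars.isspace cs.reverse).head hr
        ∈ PySem.Chars.rstrip cs := by
      rw [PySem.Chars.rstrip, List.mem_reverse]
      exact List.head_mem hr
    rw [hall _ hmem] at hhead
    exact absurd hhead (by simp)
  by_cases h : PySem.Str.rstrip x = ""
  · rw [h]; rfl
  · have h1 : (PySem.Str.rstrip x == "") = false := by simp [h]
    rw [h1]
    have h2 : PySem.Str.strip (PySem.Str.rstrip x) ≠ "" := by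
      intro hc
      apply h
      have h3 : (PySem.Str.strip (PySem.Str.rstrip x)).toList = [] := by rw [hc]; rfl
      rw [PySem.Str.toList_strip, PySem.Str.toList_rstrip] at h3
      have h4 : PySem.Chars.rstrip x.toList = [] := key x.toList h3
      have h5 : (PySem.Str.rstrip x).toList = [] := by rw [PySem.Str.toList_rstrip]; exact h4
      have h6 := congrArg String.ofList h5
      rw [String.ofList_toList] at h6
      exact h6.trans rfl
    simp [h2]

-- ===== VERDICT (by name: the statement is the Claim_ definition above) =====
theorem normalize_markdown_py_spec : Claim_equal_normalize_markdown_py := by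
  intro text _
  unfold Spec_normalize_markdown_py
  have hblk : ∀ l ∈ (PySem.Str.splitlines text).map PySem.Str.rstrip,
      (PySem.Str.strip l == "") = (l == "") := by
    intro l hl
    obtain ⟨x, _, rfl⟩ := List.mem_map.mp hl
    exact pvStripEmptyIff x
  have ha : normalize_markdown_py text = PySem.Str.strip (PySem.Str.join "\n"
      ((((PySem.Str.splitlines text).map PySem.Str.rstrip).foldl pvStepA ([], 0)).1)) := rfl
  have hb : normalize_markdown_py_alt text = PySem.Str.strip (PySem.Str.join "\n\n"
      (if (((PySem.Str.splitlines text).map PySem.Str.rstrip).foldl pvStepB ([], [])).2 ≠ []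
       then (((PySem.Str.splitlines text).map PySem.Str.rstrip).foldl pvStepB ([], [])).1
          ++ [PySem.Str.join "\n"
              ((((PySem.Str.splitlines text).map PySem.Str.rstrip).foldl pvStepB ([], [])).2)]
       else (((PySem.Str.splitlines text).map PySem.Str.rstrip).foldl pvStepB ([], [])).1)) := rfl
  rw [ha, hb, pvFoldA _ hblk [] 0, pvFoldB _ [] []]
  rw [List.nil_append, List.nil_append]
  obtain ⟨j, hj, k, hk, he⟩ := pvT ((PySem.Str.splitlines text).map PySem.Str.rstrip)
  have key : PySem.Chars.strip
        (PySem.Str.join "\n" (pvRecA false ((PySem.Str.splitlines text).map PySem.Str.rstrip))).toList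
      = PySem.Chars.strip
        (PySem.Str.join "\n\n" (pvRecB [] ((PySem.Str.splitlines text).map PySem.Str.rstrip))).toList := by
    rw [PySem.Str.toList_join, PySem.Str.toList_join]
    rw [show ("\n" : String).toList = ['\n'] from rfl,
      show ("\n\n" : String).toList = ['\n', '\n'] from rfl]
    show PySem.Chars.strip (pvJ1 (pvRecA false ((PySem.Str.splitlines text).map PySem.Str.rstrip)))
      = PySem.Chars.strip (pvJ2 (pvRecB [] ((PySem.Str.splitlines text).map PySem.Str.rstrip)))
    rw [he, pvStripPad]
  exact congrArg String.ofList key
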